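-- pv_equiv track=rewrite | github.com/kvnandula04/dsa | Misc/angry_frogs.py | angryFrogs
-- ===== SOURCE A (Python) =====
-- def angryFrogs(blocks):
--     max_distance = 0
--     start_for_both = 0
--
--     while start_for_both < len(blocks):
--         i_frog_position = start_for_both
--         j_frog_position = start_for_both
--
--         # Move i_frog as far to the left as possible
--         for i in range(start_for_both, 0, -1):
--             if (
--                 i_frog_position - 1 >= 0
--                 and blocks[i_frog_position - 1] >= blocks[i_frog_position]
--             ):
--                 i_frog_position -= 1
--             else:
--                 break
--
--         # Move j_frog as far to the right as possible
--         for j in range(start_for_both, len(blocks) - 1):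
--             if (
--                 j_frog_position + 1 < len(blocks)
--                 and blocks[j_frog_position + 1] >= blocks[j_frog_position]
--             ):
--                 j_frog_position += 1
--             else:
--                 break
--
--         # Calculate the distance between the two frogs
--         distance = j_frog_position - i_frog_position + 1
--         max_distance = max(max_distance, distance)
--         start_for_both += 1
--
--     return max_distance
-- ===== SOURCE B (Python) =====
-- def angryFrogs(blocks):
--     n = len(blocks)
--     if n == 0:
--         return 0
--     left = [0] * n
--     for i in range(1, n):
--         left[i] = left[i - 1] if blocks[i - 1] >= blocks[i] else i
--     right = [0] * n
--     right[n - 1] = n - 1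
--     for i in range(n - 2, -1, -1):
--         right[i] = right[i + 1] if blocks[i + 1] >= blocks[i] else i
--     return max(right[i] - left[i] + 1 for i in range(n))
-- ===== Notes on version B (the rewrite author's own statement) =====
-- stated objective: faster
-- what changed: Replaces A's per-start left/right linear walks (O(n^2)) with two O(n) dynamic-programming passes computing left-reach and right-reach arrays, followed by a single max pass.
import Mathlib
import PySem

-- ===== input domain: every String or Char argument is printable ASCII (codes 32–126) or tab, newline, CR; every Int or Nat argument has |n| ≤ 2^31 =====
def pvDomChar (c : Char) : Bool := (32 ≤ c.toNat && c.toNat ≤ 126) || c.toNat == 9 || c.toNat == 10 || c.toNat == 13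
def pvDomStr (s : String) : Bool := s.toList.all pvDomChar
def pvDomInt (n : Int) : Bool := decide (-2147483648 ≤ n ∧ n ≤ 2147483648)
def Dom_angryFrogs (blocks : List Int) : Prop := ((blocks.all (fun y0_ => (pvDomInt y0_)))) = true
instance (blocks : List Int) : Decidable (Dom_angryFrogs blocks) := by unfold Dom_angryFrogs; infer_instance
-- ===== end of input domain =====

-- B replaces A's quadratic per-start left/right walks with two O(n) DP passes (left-reach
-- and right-reach arrays) and one max pass; objective: faster (asymptotic, O(n^2) → O(n)).

-- ===== PORT A =====
-- inner 'for i in range(start, 0, -1)' loop: fuel = number of range elements; break → return pos.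
-- Python's 'i_frog_position - 1 >= 0' is '1 ≤ pos' on the Nat position; indices are in range so getD is exact.
def leftWalkA (b : List Int) : Nat → Nat → Nat
  | 0, pos => pos
  | f + 1, pos =>
      if 1 ≤ pos ∧ b.getD (pos - 1) 0 ≥ b.getD pos 0 then leftWalkA b f (pos - 1) else pos

-- inner 'for j in range(start, len(blocks) - 1)' loop: fuel = number of range elements.
def rightWalkA (b : List Int) : Nat → Nat → Nat
  | 0, pos => pos
  | f + 1, pos =>
      if pos + 1 < b.length ∧ b.getD (pos + 1) 0 ≥ b.getD pos 0 then rightWalkA b f (pos + 1) else pos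

-- while loop over start = 0 .. len-1, accumulating max_distance
def angryFrogs (blocks : List Int) : Int :=
  (List.range blocks.length).foldl
    (fun acc start =>
      let i := leftWalkA blocks start start
      let j := rightWalkA blocks (blocks.length - 1 - start) start
      max acc ((j : Int) - (i : Int) + 1))
    0

-- ===== PORT B =====
-- 'for i in range(1, n)' building left[i] from left[i-1]
def buildLeft (b : List Int) (n : Nat) (i : Nat) (prev : Nat) : List Nat :=
  if _h : i < n then
    let v := if b.getD (i - 1) 0 ≥ b.getD i 0 then prev else i
    v :: buildLeft b n (i + 1) v
  else []
  termination_by n - i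

-- 'for i in range(n - 2, -1, -1)' building right[i] from right[i+1]; fuel = n-1 iterations
def buildRight (b : List Int) : Nat → Nat → Nat → List Nat → List Nat
  | 0, _, _, acc => acc
  | f + 1, i, next, acc =>
      let v := if b.getD (i + 1) 0 ≥ b.getD i 0 then next else i
      buildRight b f (i - 1) v (v :: acc)

def angryFrogs_alt (blocks : List Int) : Int :=
  let n := blocks.length
  if n = 0 then 0
  else
    let left : List Nat := 0 :: buildLeft blocks n 1 0
    let right : List Nat := buildRight blocks (n - 1) (n - 2) (n - 1) [n - 1]
    let ds : List Int :=
      (List.range n).map (fun i => ((right.getD i 0 : Int) - (left.getD i 0 : Int) + 1))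
    match PySem.List.max? ds (fun x => x) with
    | some m => m
    | none => 0

-- ===== PRECONDITION & SPEC =====
def Spec_angryFrogs (blocks : List Int) (out : Int) : Prop := out = angryFrogs_alt blocks
instance (blocks : List Int) (out : Int) : Decidable (Spec_angryFrogs blocks out) := by unfold Spec_angryFrogs; infer_instance

-- ===== CLAIM (what is proved, stated in full; the proofs are below) =====
def Claim_equal_angryFrogs : Prop := ∀ (blocks : List Int), Dom_angryFrogs blocks → Spec_angryFrogs blocks (angryFrogs blocks)

-- ===== LEMMAS AND PROOFS =====

-- reference recurrences for the reach arrays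
def leftF (b : List Int) : Nat → Nat
  | 0 => 0
  | i + 1 => if b.getD i 0 ≥ b.getD (i + 1) 0 then leftF b i else i + 1

def rightF (b : List Int) (n : Nat) (i : Nat) : Nat :=
  if _h : i + 1 < n then
    (if b.getD (i + 1) 0 ≥ b.getD i 0 then rightF b n (i + 1) else i)
  else i
  termination_by n - i

theorem leftWalkA_eq (b : List Int) : ∀ i, leftWalkA b i i = leftF b i := by
  intro i
  induction i with
  | zero => simp [leftWalkA, leftF]
  | succ i ih =>
      simp only [leftWalkA, leftF]
      by_cases h : b.getD (i + 1) 0 ≤ b.getD i 0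
      · simp only [List.getD] at h
        simpa [h, Nat.add_sub_cancel] using ih
      · simp only [List.getD] at h
        simp [h]

theorem rightWalkA_eq (b : List Int) (n : Nat) (hn : n = b.length) :
    ∀ k i, k = n - 1 - i → rightWalkA b k i = rightF b n i := by
  intro k
  induction k with
  | zero =>
      intro i hk
      rw [rightF]
      have : ¬ i + 1 < n := by omega
      simp [rightWalkA, this]
  | succ k ih =>
      intro i hk
      have hlt : i + 1 < n := by omega
      rw [rightF]
      simp only [rightWalkA, hn ▸ hlt, true_and, dif_pos hlt]
      split_ifs with h
      · exact ih (i + 1) (by omega)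
      · rfl

theorem buildLeft_succ (b : List Int) (n i prev : Nat) (h : i < n) :
    buildLeft b n i prev =
      (if b.getD (i - 1) 0 ≥ b.getD i 0 then prev else i)
        :: buildLeft b n (i + 1) (if b.getD (i - 1) 0 ≥ b.getD i 0 then prev else i) := by
  rw [buildLeft, dif_pos h]

theorem buildRight_succ (b : List Int) (f i next : Nat) (acc : List Nat) :
    buildRight b (f + 1) i next acc =
      buildRight b f (i - 1) (if b.getD (i + 1) 0 ≥ b.getD i 0 then next else i)
        ((if b.getD (i + 1) 0 ≥ b.getD i 0 then next else i) :: acc) := rfl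

theorem leftF_le (b : List Int) : ∀ i, leftF b i ≤ i := by
  intro i
  induction i with
  | zero => simp [leftF]
  | succ i ih =>
      rw [leftF]; split
      · omega
      · omega

theorem le_rightF (b : List Int) (n : Nat) : ∀ i, i ≤ rightF b n i := by
  intro i
  induction hi : n - i using Nat.strong_induction_on generalizing i with
  | _ m ih =>
      rw [rightF]
      split
      · split
        · have := ih (n - (i + 1)) (by omega) (i + 1) rfl
          omega
        · omega
      · omega

theorem buildLeft_eq (b : List Int) (n : Nat) :
    ∀ m i prev, n - i = m → 1 ≤ i → prev = leftF b (i - 1) →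
      buildLeft b n i prev = (List.range' i (n - i)).map (leftF b) := by
  intro m
  induction m using Nat.strong_induction_on with
  | _ m ih =>
      intro i prev hm h1 hprev
      by_cases h : i < n
      · rw [buildLeft_succ b n i prev h]
        have hr : n - i = (n - (i + 1)) + 1 := by omega
        rw [hr, List.range'_succ, List.map_cons]
        obtain ⟨j, rfl⟩ : ∃ j, i = j + 1 := ⟨i - 1, by omega⟩
        have hv : (if b.getD (j + 1 - 1) 0 ≥ b.getD (j + 1) 0 then prev else j + 1)
            = leftF b (j + 1) := by
          rw [leftF]
          simp only [Nat.add_sub_cancel] at hprev ⊢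
          by_cases hc : b.getD (j + 1) 0 ≤ b.getD j 0
          · simp only [List.getD] at hc
            simp [hc, hprev]
          · simp only [List.getD] at hc
            simp [hc]
        rw [hv]
        have hrec := ih (n - (j + 1 + 1)) (by omega) (j + 1 + 1) (leftF b (j + 1))
          rfl (by omega) (by simp)
        rw [hrec]
      · rw [buildLeft, dif_neg h]
        have h0 : n - i = 0 := by omega
        simp [h0]

theorem buildRight_eq (b : List Int) (n : Nat) :
    ∀ i, i + 1 ≤ n - 1 →
      buildRight b (i + 1) i (rightF b n (i + 1))
          ((List.range' (i + 1) (n - 1 - i)).map (rightF b n)) =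
        (List.range' 0 n).map (rightF b n) := by
  intro i
  induction i with
  | zero =>
      intro hle
      have h1 : (0 : Nat) + 1 < n := by omega
      rw [buildRight_succ]
      have hv : (if b.getD (0 + 1) 0 ≥ b.getD 0 0 then rightF b n (0 + 1) else 0)
          = rightF b n 0 := by
        conv_rhs => rw [rightF]
        rw [dif_pos h1]
      rw [hv]
      simp only [buildRight]
      obtain ⟨k, hk⟩ : ∃ k, n = k + 1 := ⟨n - 1, by omega⟩
      subst hk
      rw [List.range'_succ]
      simp
  | succ i ih =>
      intro hle
      have hlt : i + 1 + 1 < n := by omega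
      rw [buildRight_succ]
      have hv : (if b.getD (i + 1 + 1) 0 ≥ b.getD (i + 1) 0 then rightF b n (i + 1 + 1) else i + 1)
          = rightF b n (i + 1) := by
        conv_rhs => rw [rightF]
        rw [dif_pos hlt]
      rw [hv]
      have hacc : rightF b n (i + 1) :: (List.range' (i + 1 + 1) (n - 1 - (i + 1))).map (rightF b n)
          = (List.range' (i + 1) (n - 1 - i)).map (rightF b n) := by
        have hr : n - 1 - i = (n - 1 - (i + 1)) + 1 := by omega
        rw [hr, List.range'_succ]
        simp
      simp only [Nat.add_sub_cancel]
      rw [hacc]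
      exact ih (by omega)

theorem left_list_eq (b : List Int) (n : Nat) (h1 : 1 ≤ n) :
    (0 : Nat) :: buildLeft b n 1 0 = (List.range' 0 n).map (leftF b) := by
  obtain ⟨k, hk⟩ : ∃ k, n = k + 1 := ⟨n - 1, by omega⟩
  subst hk
  rw [List.range'_succ, List.map_cons]
  have h0 : leftF b 0 = 0 := by simp [leftF]
  rw [h0]
  congr 1
  have := buildLeft_eq b (k + 1) k 1 0 (by omega) (by omega) (by simp [leftF])
  simpa using this

theorem right_list_eq (b : List Int) (n : Nat) (h1 : 1 ≤ n) :
    buildRight b (n - 1) (n - 2) (n - 1) [n - 1]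
      = (List.range' 0 n).map (rightF b n) := by
  by_cases hone : n = 1
  · subst hone
    simp only [buildRight]
    have h0 : rightF b 1 0 = 0 := by rw [rightF]; simp
    simp [List.range', h0]
  · have h2 : 2 ≤ n := by omega
    have he : n - 2 + 1 = n - 1 := by omega
    have hnext : rightF b n (n - 1) = n - 1 := by
      rw [rightF]
      have : ¬ (n - 1 + 1 < n) := by omega
      simp [this]
    have hacc : (List.range' (n - 1) (n - 1 - (n - 2))).map (rightF b n)
        = ([n - 1] : List Nat) := by
      have hr : n - 1 - (n - 2) = 1 := by omega
      rw [hr]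
      simp [List.range', hnext]
    have hmain := buildRight_eq b n (n - 2) (by omega)
    rw [he, hnext, hacc] at hmain
    exact hmain

theorem getD_map_range' {α : Type} (f : Nat → α) (n i : Nat) (d : α) (h : i < n) :
    ((List.range' 0 n).map f).getD i d = f i := by
  rw [List.getD_eq_getElem?_getD, List.getElem?_map, List.getElem?_range' (by omega)]
  simp

-- foldl max 0 over a nonempty list of values all ≥ 1 equals Python's max() of the list
theorem foldl_max_pos (l : List Int) (hne : l ≠ [])
    (hpos : ∀ x ∈ l, (1 : Int) ≤ x) :
    l.foldl max 0 = (match PySem.List.max? l (fun x => x) with | some m => m | none => 0) := by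
  cases l with
  | nil => exact absurd rfl hne
  | cons x t =>
      rw [PySem.List.max?_id_cons]
      simp only [List.foldl_cons]
      have hx : max (0 : Int) x = x :=
        max_eq_right (by have := hpos x (by simp); omega)
      rw [hx]

theorem foldlCongrMem {α β : Type} (f g : β → α → β) (init : β) :
    ∀ (l : List α), (∀ acc x, x ∈ l → f acc x = g acc x) →
      l.foldl f init = l.foldl g init := by
  intro l
  induction l generalizing init with
  | nil => intro _; rfl
  | cons x t ih =>
      intro h
      simp only [List.foldl_cons]
      rw [h init x (by simp)]
      exact ih (g init x) (fun acc y hy => h acc y (by simp [hy]))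

theorem angryFrogs_eq (blocks : List Int) : angryFrogs blocks = angryFrogs_alt blocks := by
  by_cases h0 : blocks.length = 0
  · simp [angryFrogs, angryFrogs_alt, h0]
  · have h1 : 1 ≤ blocks.length := by omega
    set n := blocks.length with hn
    have hG : ∀ acc s, s ∈ List.range n →
        (fun acc start => max acc
          ((rightWalkA blocks (blocks.length - 1 - start) start : Int)
            - (leftWalkA blocks start start : Int) + 1)) acc s
        = (fun acc start => max acc
          ((rightF blocks n start : Int) - (leftF blocks start : Int) + 1)) acc s := by
      intro acc s _
      simp only
      rw [leftWalkA_eq, rightWalkA_eq blocks n hn _ s rfl]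
    have hds : ((List.range n).map
        (fun i => ((((buildRight blocks (n - 1) (n - 2) (n - 1) [n - 1]).getD i 0 : Nat) : Int)
          - (((((0 : Nat) :: buildLeft blocks n 1 0).getD i 0 : Nat)) : Int) + 1)))
        = (List.range n).map
          (fun i => ((rightF blocks n i : Int) - (leftF blocks i : Int) + 1)) := by
      apply List.map_congr_left
      intro i hi
      have hilt : i < n := List.mem_range.mp hi
      rw [right_list_eq blocks n h1, left_list_eq blocks n h1,
        getD_map_range' _ n i 0 hilt, getD_map_range' _ n i 0 hilt]
    have hpos : ∀ x ∈ (List.range n).map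
        (fun i => ((rightF blocks n i : Int) - (leftF blocks i : Int) + 1)), (1 : Int) ≤ x := by
      intro x hx
      obtain ⟨i, _, rfl⟩ := List.mem_map.mp hx
      have hl := leftF_le blocks i
      have hr := le_rightF blocks n i
      have hl' : (leftF blocks i : Int) ≤ i := by exact_mod_cast hl
      have hr' : (i : Int) ≤ rightF blocks n i := by exact_mod_cast hr
      omega
    have hne : (List.range n).map
        (fun i => ((rightF blocks n i : Int) - (leftF blocks i : Int) + 1)) ≠ [] := by
      simp [List.map_eq_nil_iff, List.range_eq_nil]
      omega
    unfold angryFrogs angryFrogs_alt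
    rw [if_neg h0]
    simp only [← hn]
    rw [foldlCongrMem _ _ _ _ (fun acc s hs => hG acc s hs)]
    rw [hds]
    rw [← foldl_max_pos _ hne hpos]
    rw [List.foldl_map]

-- ===== VERDICT (by name: the statement is the Claim_ definition above) =====
theorem angryFrogs_spec : Claim_equal_angryFrogs := by
  intro blocks _
  unfold Spec_angryFrogs
  exact angryFrogs_eq blocks
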